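/-
  The simp set `vspec`: the numbers a `Spec` of Vorbis/Spec/*.lean is made of — `(memset.spec others frames).frame = 64` — so that
  the stack arithmetic of a walk (`he_room`, the `call_room` goal of a call) is over numerals. `v_entry` and `v_side`
  (Vorbis/Spec/Basic.lean) use it; every Spec file tags one `…spec_frame` lemma per function.
-/
import Lean
/-- The frame sizes of the function contracts (Vorbis/Spec/*.lean), as rewrite rules. -/
register_simp_attr vspec
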